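-- pv_equiv track=rewrite | github.com/MrBrantCode/unitest_baseline | mut_generate/mist_train_taco/taco_4181/solution.py | increment_in_base
-- ===== SOURCE A (Python) =====
-- def increment_in_base(B: int, N: str) -> str:
--     # Convert the number from base B to decimal
--     x = 0
--     for i in range(len(N)):
--         w = pow(B, i)
--         c = 0
--         if '0' <= N[len(N) - 1 - i] <= '9':
--             c = int(ord(N[len(N) - 1 - i]) - ord('0'))
--         else:
--             c = int(ord(N[len(N) - 1 - i]) - ord('A') + 10)
--         x = x + c * w
--
--     # Increment the decimal number by 1
--     x = x + 1
--
--     # Convert the incremented decimal number back to base B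
--     ans = ''
--     while x != 0:
--         r = x % B
--         c = '0'
--         if r < 10:
--             c = chr(int(r + ord('0')))
--         else:
--             c = chr(int(r - 10 + ord('A')))
--         ans = c + ans
--         x //= B
--
--     return ans
-- ===== SOURCE B (Python) =====
-- def _val(c: str) -> int:
--     return ord(c) - 48 if '0' <= c <= '9' else ord(c) - 55
--
-- def _chr(v: int) -> str:
--     return chr(v + 48) if v < 10 else chr(v + 55)
--
-- def increment_in_base(B: int, N: str) -> str:
--     if B < 2:
--         raise ValueError("base must be at least 2")
--     # digit-wise increment: one right-to-left pass propagating the carry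
--     out = []
--     carry = 1
--     for ch in reversed(N):
--         carry, r = divmod(_val(ch) + carry, B)
--         out.append(_chr(r))
--     while carry > 0:
--         carry, r = divmod(carry, B)
--         out.append(_chr(r))
--     if carry < 0:
--         raise ValueError("negative value")
--     out.reverse()
--     i = 0
--     while i < len(out) and out[i] == '0':
--         i += 1
--     return ''.join(out[i:])
-- ===== Notes on version B (the rewrite author's own statement) =====
-- stated objective: faster
-- what changed: A converts the whole numeral to one big integer (recomputing pow(B,i) per digit) and re-serialises it with a divmod chain; B makes a single right-to-left digit pass propagating a carry, then strips leading zeros.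
-- outside the precondition, e.g. on increment_in_base(-2, '5'): A returns '///0', B raises ValueError; on increment_in_base(0, '5'): A raises ZeroDivisionError, B raises ValueError; on increment_in_base(1, '0'): A does not finish within the time limit, B raises ValueError
import Mathlib
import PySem

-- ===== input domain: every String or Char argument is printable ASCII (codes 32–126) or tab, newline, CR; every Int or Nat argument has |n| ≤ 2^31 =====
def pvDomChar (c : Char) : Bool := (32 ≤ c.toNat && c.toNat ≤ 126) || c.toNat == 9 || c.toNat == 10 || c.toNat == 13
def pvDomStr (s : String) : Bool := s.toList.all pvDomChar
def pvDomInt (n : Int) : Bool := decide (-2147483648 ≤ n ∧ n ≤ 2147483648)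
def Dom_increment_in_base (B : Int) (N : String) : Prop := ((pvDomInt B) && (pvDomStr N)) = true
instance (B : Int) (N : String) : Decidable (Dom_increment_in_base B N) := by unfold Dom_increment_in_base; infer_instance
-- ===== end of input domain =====

-- B replaces A's convert-to-a-big-integer-and-reserialise (quadratic: pow(B,i) per digit,
-- then a divmod chain on the full value) by one right-to-left digit pass propagating a
-- carry (linear); Python B raises ValueError where A diverges/raises (Pre_ excludes those).

-- ===== PORT A =====
-- A's char→value: ord arithmetic (ord c = c.toNat, exact on ASCII)
def aCharVal (c : Char) : Int :=
  if '0' ≤ c ∧ c ≤ '9' then ((c.toNat : Int) - 48) else ((c.toNat : Int) - 65 + 10)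

-- chr(r+48) / chr(r-10+65); Char.ofNat is exact for the codes Python's chr accepts here
def aDigitChar (r : Int) : Char :=
  if r < 10 then Char.ofNat (r + 48).toNat else Char.ofNat (r - 10 + 65).toNat

-- the 'while x != 0' loop; fuel only makes it total (x.natAbs + 1 steps suffice when 2 ≤ B, x ≥ 0)
def aWhile (B : Int) : Nat → Int → List Char → List Char
  | 0, _, ans => ans
  | fuel + 1, x, ans =>
    if x = 0 then ans
    else aWhile B fuel (PySem.Int.floordiv x B) (aDigitChar (PySem.Int.mod x B) :: ans)

def increment_in_base (B : Int) (N : String) : String :=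
  let cs := N.toList
  let x :=
    (PySem.List.pyRange 0 (PySem.Str.len N) 1).foldl
      (fun x i =>
        let w := B ^ i.toNat           -- pow(B, i), i ≥ 0 from range: exact
        let c := aCharVal (PySem.List.pyGetD cs (PySem.Str.len N - 1 - i) ' ')
        x + c * w) 0
  let x := x + 1
  String.ofList (aWhile B (x.natAbs + 1) x [])

-- ===== PORT B =====
def bVal (c : Char) : Int :=
  if '0' ≤ c ∧ c ≤ '9' then ((c.toNat : Int) - 48) else ((c.toNat : Int) - 55)

def bChr (v : Int) : Char :=
  if v < 10 then Char.ofNat (v + 48).toNat else Char.ofNat (v + 55).toNat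

-- the 'for ch in reversed(N)' pass: digit list is lsb-first, returns (digits out, final carry)
def bPass (B : Int) : List Char → Int → List Char × Int
  | [], c => ([], c)
  | d :: t, c =>
    let q := PySem.Int.floordiv (bVal d + c) B
    let r := PySem.Int.mod (bVal d + c) B
    let p := bPass B t q
    (bChr r :: p.1, p.2)

-- the 'while carry > 0' loop; fuel only makes it total (carry.natAbs + 1 steps suffice when 2 ≤ B)
def bTail (B : Int) : Nat → Int → List Char
  | 0, _ => []
  | fuel + 1, c =>
    if 0 < c then
      bChr (PySem.Int.mod c B) :: bTail B fuel (PySem.Int.floordiv c B)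
    else []

-- Source B raises ValueError when B < 2 or when the final carry is negative; Pre_ excludes those inputs
def increment_in_base_alt (B : Int) (N : String) : String :=
  let p := bPass B N.toList.reverse 1
  let out := p.1 ++ bTail B (p.2.natAbs + 1) p.2
  String.ofList (out.reverse.dropWhile (· == '0'))

-- ===== PRECONDITION & SPEC =====
-- the value A's first loop assigns to a character / to the string (lsb-first digit list)
def preDigitVal (c : Char) : Int :=
  if '0' ≤ c ∧ c ≤ '9' then ((c.toNat : Int) - 48) else ((c.toNat : Int) - 55)

def preValue (B : Int) : List Char → Int
  | [] => 0
  | c :: t => preDigitVal c + B * preValue B t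

-- Pre_ keeps base ≥ 2 and strings denoting a value ≥ -1 (so the incremented value is ≥ 0).
-- Outside it A raises ZeroDivisionError (B = 0), diverges (B = 1 with nonzero value, or a
-- negative incremented value), or — for B ≤ -2 — returns digit strings built from Python's
-- nonpositive floor-division remainders, an artefact of '%' with a negative divisor; Python B
-- raises ValueError on all of these.
def Pre_increment_in_base (B : Int) (N : String) : Prop :=
  2 ≤ B ∧ 0 ≤ preValue B N.toList.reverse + 1
instance (B : Int) (N : String) : Decidable (Pre_increment_in_base B N) := by
  unfold Pre_increment_in_base; infer_instance

def pvWitness_increment_in_base : Int × String := (16, "3F9")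

def Spec_increment_in_base (B : Int) (N : String) (out : String) : Prop := out = increment_in_base_alt B N
instance (B : Int) (N : String) (out : String) : Decidable (Spec_increment_in_base B N out) := by unfold Spec_increment_in_base; infer_instance

-- ===== CLAIM (what is proved, stated in full; the proofs are below) =====
def Claim_equal_increment_in_base : Prop := ∀ (B : Int) (N : String), Dom_increment_in_base B N → Pre_increment_in_base B N → Spec_increment_in_base B N (increment_in_base B N)

-- ===== LEMMAS AND PROOFS =====

-- the Int value of an lsb-first digit list
def intPoly (B : Int) : List Int → Int
  | [] => 0
  | d :: t => d + B * intPoly B t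

lemma aDigitChar_eq_bChr (r : Int) : aDigitChar r = bChr r := by
  unfold aDigitChar bChr
  split
  · rfl
  · congr 1; omega

lemma aCharVal_eq_bVal (c : Char) : aCharVal c = bVal c := by
  unfold aCharVal bVal
  split
  · rfl
  · omega

lemma preValue_eq_intPoly (B : Int) : ∀ l : List Char, preValue B l = intPoly B (l.map bVal) := by
  intro l
  induction l with
  | nil => rfl
  | cons c t ih => simp only [preValue, intPoly, List.map_cons, ih]; rfl

lemma intPoly_append_singleton (B : Int) (l : List Int) (d : Int) :
    intPoly B (l ++ [d]) = intPoly B l + d * B ^ l.length := by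
  induction l with
  | nil => simp [intPoly]
  | cons e t ih => simp [intPoly, ih]; ring

-- A's summation loop computes the lsb-first polynomial of the reversed digit list
lemma sumA (B : Int) (cs : List Char) :
    (PySem.List.pyRange 0 (cs.length : Int) 1).foldl
      (fun x i => x + aCharVal (PySem.List.pyGetD cs ((cs.length : Int) - 1 - i) ' ') * B ^ i.toNat) 0
    = intPoly B (cs.reverse.map aCharVal) := by
  induction cs with
  | nil => simp [intPoly, PySem.List.pyRange]
  | cons c t ih =>
    simp only [List.length_cons]
    have hlen : (((t.length + 1 : Nat)) : Int) = (t.length : Int) + 1 := by push_cast; ring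
    rw [hlen, PySem.List.pyRange_one_succ_right (by exact_mod_cast Nat.zero_le _)]
    have hinner :
        List.foldl
          (fun x i => x + aCharVal (PySem.List.pyGetD (c :: t) ((t.length : Int) + 1 - 1 - i) ' ') * B ^ i.toNat)
          0 (PySem.List.pyRange 0 (t.length : Int))
        = intPoly B (List.map aCharVal t.reverse) := by
      rw [PySem.List.foldl_congr_mem _ _
        (fun x i => x + aCharVal (PySem.List.pyGetD t ((t.length : Int) - 1 - i) ' ') * B ^ i.toNat) _
        (by
          intro acc i hi
          rw [PySem.List.mem_pyRange_one] at hi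
          have hidx1 : PySem.List.pyGetD (c :: t) ((t.length : Int) + 1 - 1 - i) ' '
              = PySem.List.pyGetD t ((t.length : Int) - 1 - i) ' ' := by
            rw [PySem.List.pyGetD_eq_getElem _ _ (by omega) (by simp; omega),
                PySem.List.pyGetD_eq_getElem _ _ (by omega) (by omega)]
            have hk : ((t.length : Int) + 1 - 1 - i).toNat = ((t.length : Int) - 1 - i).toNat + 1 := by
              omega
            simp only [hk, List.getElem_cons_succ]
          rw [hidx1])]
      exact ih
    rw [List.foldl_append, hinner]
    simp only [List.foldl_cons, List.foldl_nil]
    have hidx0 : ((t.length : Int) + 1 - 1 - (t.length : Int)) = 0 := by ring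
    rw [hidx0, PySem.List.pyGetD_zero_cons]
    rw [List.reverse_cons, List.map_append, List.map_cons, List.map_nil,
        intPoly_append_singleton]
    simp

-- A's while loop prints the canonical base-b digits (msb-first)
lemma aWhile_digits (b : Nat) (hb : 2 ≤ b) :
    ∀ fuel (x : Nat), x ≤ fuel → ∀ ans,
      aWhile (b : Int) fuel (x : Int) ans
        = ((Nat.digits b x).reverse.map (fun d : Nat => aDigitChar (d : Int))) ++ ans := by
  intro fuel
  induction fuel with
  | zero =>
    intro x hx ans
    have : x = 0 := by omega
    subst this
    simp [aWhile]
  | succ f ih =>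
    intro x hx ans
    by_cases hx0 : x = 0
    · subst hx0; simp [aWhile]
    · have hxp : 0 < x := Nat.pos_of_ne_zero hx0
      rw [aWhile, if_neg (by exact_mod_cast hx0)]
      rw [PySem.Int.floordiv_natCast, PySem.Int.mod_natCast]
      rw [ih (x / b) (by
        have := Nat.div_lt_self hxp (by omega : 1 < b)
        omega) _]
      rw [Nat.digits_def' (by omega : 1 < b) hxp]
      simp

-- B's carry loop prints the canonical base-b digits (lsb-first)
lemma bTail_digits (b : Nat) (hb : 2 ≤ b) :
    ∀ fuel (x : Nat), x ≤ fuel →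
      bTail (b : Int) fuel (x : Int)
        = (Nat.digits b x).map (fun d : Nat => bChr (d : Int)) := by
  intro fuel
  induction fuel with
  | zero =>
    intro x hx
    have : x = 0 := by omega
    subst this
    simp [bTail]
  | succ f ih =>
    intro x hx
    by_cases hx0 : x = 0
    · subst hx0; simp [bTail]
    · have hxp : 0 < x := Nat.pos_of_ne_zero hx0
      rw [bTail, if_pos (by exact_mod_cast hxp)]
      rw [PySem.Int.floordiv_natCast, PySem.Int.mod_natCast]
      rw [ih (x / b) (by
        have := Nat.div_lt_self hxp (by omega : 1 < b)
        omega)]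
      rw [Nat.digits_def' (by omega : 1 < b) hxp]
      simp

lemma bChr_ne_zero (k : Nat) (hk : k ≠ 0) : bChr (k : Int) ≠ '0' := by
  intro he
  have h48 := congrArg Char.toNat he
  unfold bChr at h48
  split at h48
  · rename_i hlt
    have hk10 : k < 10 := by exact_mod_cast hlt
    have harg : ((k : Int) + 48).toNat = k + 48 := by omega
    rw [harg, Char.toNat_ofNat] at h48
    rw [if_pos (Or.inl (by omega : k + 48 < 0xD800))] at h48
    simp at h48
    omega
  · have harg : ((k : Int) + 55).toNat = k + 55 := by omega
    rw [harg, Char.toNat_ofNat] at h48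
    have h480 : ('0').toNat = 48 := rfl
    rw [h480] at h48
    split at h48 <;> omega

-- the canonical digit string has no leading zero, so the strip is a no-op on it
lemma nolead (b : Nat) (n : Nat) :
    (((Nat.digits b n).map (fun d : Nat => bChr (d : Int))).reverse).dropWhile (· == '0')
      = ((Nat.digits b n).map (fun d : Nat => bChr (d : Int))).reverse := by
  by_cases hn : n = 0
  · subst hn; simp
  · have hdne : Nat.digits b n ≠ [] := Nat.digits_ne_nil_iff_ne_zero.mpr hn
    have hmne : (Nat.digits b n).map (fun d : Nat => bChr (d : Int)) ≠ [] := by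
      simp [hdne]
    have hlast : ((Nat.digits b n).map (fun d : Nat => bChr (d : Int))).getLast hmne
        = bChr ((((Nat.digits b n).getLast hdne) : Nat) : Int) := by
      rw [List.getLast_map]
    have hhead : (((Nat.digits b n).map (fun d : Nat => bChr (d : Int))).reverse).head?
        = some (bChr ((((Nat.digits b n).getLast hdne) : Nat) : Int)) := by
      rw [List.head?_reverse, List.getLast?_eq_some_getLast hmne, hlast]
    cases hrev : (((Nat.digits b n).map (fun d : Nat => bChr (d : Int))).reverse) with
    | nil => simp
    | cons a u =>
      rw [hrev] at hhead
      simp at hhead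
      have hne0 : a ≠ '0' := by
        rw [hhead]
        exact bChr_ne_zero _ (Nat.getLast_digit_ne_zero b hn)
      rw [List.dropWhile_cons_of_neg (by simpa using hne0)]

-- the carry pass emits A's digit chain padded with leading zeros: after the strip they agree
lemma pass_strip (b : Nat) (hb : 2 ≤ b) :
    ∀ (ds : List Char) (c : Int), 0 ≤ intPoly (b : Int) (ds.map bVal) + c →
      0 ≤ (bPass (b : Int) ds c).2 ∧
      ((((bPass (b : Int) ds c).1
          ++ (Nat.digits b (bPass (b : Int) ds c).2.toNat).map (fun d : Nat => bChr (d : Int))).reverse).dropWhile (· == '0')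
        = ((Nat.digits b (intPoly (b : Int) (ds.map bVal) + c).toNat).map (fun d : Nat => bChr (d : Int))).reverse) := by
  intro ds
  induction ds with
  | nil =>
    intro c hc
    simp only [intPoly, List.map_nil, Int.zero_add] at hc ⊢
    refine ⟨hc, ?_⟩
    simp only [bPass, List.nil_append]
    exact nolead b c.toNat
  | cons d t ih =>
    intro c hc
    have hbpos : (0 : Int) < (b : Int) := by exact_mod_cast (by omega : 0 < b)
    set s := bVal d + c with hs
    set q := PySem.Int.floordiv s (b : Int) with hq
    set r := PySem.Int.mod s (b : Int) with hr
    have hsr : q * (b : Int) + r = s := PySem.Int.floordiv_mul_add_mod s (b : Int)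
    have hr0 : 0 ≤ r := PySem.Int.mod_nonneg s hbpos
    have hrb : r < (b : Int) := PySem.Int.mod_lt s hbpos
    set P := intPoly (b : Int) (t.map bVal) with hP
    have hX : intPoly (b : Int) ((d :: t).map bVal) + c = r + (b : Int) * (P + q) := by
      simp only [List.map_cons, intPoly]
      have : bVal d + (b : Int) * P + c = s + (b : Int) * P := by rw [hs]; ring
      rw [this, ← hsr]; ring
    have hY0 : 0 ≤ P + q := by
      by_contra hneg
      have h1 : P + q ≤ -1 := by omega
      have h2 : (b : Int) * (P + q) ≤ (b : Int) * (-1) :=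
        mul_le_mul_of_nonneg_left h1 (le_of_lt hbpos)
      rw [hX] at hc
      omega
    have hih := ih q (by rw [hP] at hY0; linarith [hY0])
    -- Nat decomposition of the value
    have hXnat : (intPoly (b : Int) ((d :: t).map bVal) + c).toNat
        = r.toNat + b * (P + q).toNat := by
      have he : intPoly (b : Int) ((d :: t).map bVal) + c
          = ((r.toNat + b * (P + q).toNat : Nat) : Int) := by
        rw [hX]
        push_cast [Int.toNat_of_nonneg hr0, Int.toNat_of_nonneg hY0]
        ring
      rw [he, Int.toNat_natCast]
    have hrnat : r.toNat < b := by omega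
    have hrchr : bChr r = bChr ((r.toNat : Nat) : Int) := by
      rw [Int.toNat_of_nonneg hr0]
    -- unfold one step of the pass
    simp only [bPass, ← hq, ← hr, ← hs]
    refine ⟨hih.1, ?_⟩
    rw [List.cons_append, List.reverse_cons, List.dropWhile_append, hih.2, hXnat]
    by_cases hYz : (P + q).toNat = 0
    · rw [hYz, Nat.mul_zero, Nat.add_zero]
      by_cases hrz : r.toNat = 0
      · rw [hYz] at hih
        simp only [Nat.digits_zero, List.map_nil, List.reverse_nil, List.isEmpty_nil,
          if_pos] at *
        rw [hrz]
        simp only [Nat.digits_zero, List.map_nil, List.reverse_nil]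
        have : bChr r = '0' := by
          rw [hrchr, hrz]; rfl
        rw [this]
        rfl
      · simp only [Nat.digits_zero, List.map_nil, List.reverse_nil, List.isEmpty_nil,
          if_pos]
        rw [Nat.digits_def' (by omega : 1 < b) (Nat.pos_of_ne_zero hrz),
            Nat.mod_eq_of_lt hrnat, Nat.div_eq_of_lt hrnat]
        simp only [Nat.digits_zero, List.map_cons, List.map_nil, List.reverse_cons,
          List.reverse_nil, List.nil_append]
        rw [List.dropWhile_cons_of_neg (by simpa [hrchr] using bChr_ne_zero r.toNat hrz)]
        rw [hrchr]
    · have hXz : r.toNat + b * (P + q).toNat ≠ 0 := by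
        have : 1 ≤ (P + q).toNat := by omega
        have : b * 1 ≤ b * (P + q).toNat := Nat.mul_le_mul_left b this
        omega
      have hYne : ((Nat.digits b (P + q).toNat).map (fun d : Nat => bChr (d : Int))).reverse ≠ [] := by
        simp [Nat.digits_ne_nil_iff_ne_zero.mpr hYz]
      rw [if_neg (by simpa [List.isEmpty_iff] using hYne)]
      rw [Nat.digits_def' (by omega : 1 < b) (Nat.pos_of_ne_zero hXz),
          Nat.add_mul_mod_self_left, Nat.mod_eq_of_lt hrnat,
          Nat.add_mul_div_left _ _ (by omega : 0 < b), Nat.div_eq_of_lt hrnat, Nat.zero_add]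
      simp only [List.map_cons, List.reverse_cons]
      rw [hrchr]

-- ===== VERDICT (by name: the statement is the Claim_ definition above) =====
theorem increment_in_base_spec : Claim_equal_increment_in_base := by
  unfold Claim_equal_increment_in_base
  intro B N _ hpre
  obtain ⟨hB, hval⟩ := hpre
  unfold Spec_increment_in_base
  set b := B.toNat with hbdef
  have hBb : (b : Int) = B := Int.toNat_of_nonneg (by omega)
  have hb2 : 2 ≤ b := by omega
  set cs := N.toList with hcs
  set X : Int := intPoly B (cs.reverse.map bVal) + 1 with hX
  have hX0 : 0 ≤ X := by
    rw [hX, ← preValue_eq_intPoly]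
    exact hval
  -- ===== A's side =====
  have hsum :
      (PySem.List.pyRange 0 (cs.length : Int) 1).foldl
        (fun x i => x + aCharVal (PySem.List.pyGetD cs ((cs.length : Int) - 1 - i) ' ') * B ^ i.toNat) 0
      = X - 1 := by
    rw [sumA B cs, List.map_congr_left (fun x _ => aCharVal_eq_bVal x), hX]
    ring
  have hA : increment_in_base B N
      = String.ofList ((Nat.digits b X.toNat).reverse.map (fun d : Nat => aDigitChar (d : Int))) := by
    unfold increment_in_base
    dsimp only
    rw [PySem.Str.len_eq, ← hcs, hsum]
    have hx1 : X - 1 + 1 = ((X.toNat : Nat) : Int) := by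
      rw [Int.toNat_of_nonneg hX0]; ring
    rw [hx1, Int.natAbs_natCast, ← hBb]
    rw [aWhile_digits b hb2 (X.toNat + 1) X.toNat (by omega) []]
    rw [List.append_nil]
  -- ===== B's side =====
  have hpass := pass_strip b hb2 cs.reverse 1 (by rw [hBb, ← hX]; exact hX0)
  have hc0 : 0 ≤ (bPass (b : Int) cs.reverse 1).2 := hpass.1
  have hB' : increment_in_base_alt B N
      = String.ofList (((Nat.digits b X.toNat).map (fun d : Nat => bChr (d : Int))).reverse) := by
    unfold increment_in_base_alt
    dsimp only
    rw [← hcs, ← hBb]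
    have htail : bTail (b : Int) ((bPass (b : Int) cs.reverse 1).2.natAbs + 1)
        (bPass (b : Int) cs.reverse 1).2
        = (Nat.digits b (bPass (b : Int) cs.reverse 1).2.toNat).map (fun d : Nat => bChr (d : Int)) := by
      have hcast : ((bPass (b : Int) cs.reverse 1).2.toNat : Int) = (bPass (b : Int) cs.reverse 1).2 :=
        Int.toNat_of_nonneg hc0
      have hfa : (bPass (b : Int) cs.reverse 1).2.natAbs = (bPass (b : Int) cs.reverse 1).2.toNat := by
        omega
      rw [hfa, ← hcast]
      exact bTail_digits b hb2 _ _ (by omega)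
    rw [htail, hpass.2]
    congr 2
    rw [hBb, ← hX]
  rw [hA, hB']
  rw [← List.map_reverse]
  congr 1
  exact List.map_congr_left (fun d _ => aDigitChar_eq_bChr _)
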